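-- pv_equiv track=rewrite | github.com/gptme/gptme-contrib | packages/gptme-voice/src/gptme_voice/realtime/server.py | _truncate_resume_transcript
-- ===== SOURCE A (Python) =====
-- def _truncate_resume_transcript(transcript_text: str, max_chars: int) -> str:
--     """Keep the newest transcript lines without starting mid-line."""
--     if len(transcript_text) <= max_chars:
--         return transcript_text
--
--     lines = transcript_text.splitlines()
--     kept_lines: list[str] = []
--     total_chars = 0
--
--     for line in reversed(lines):
--         line_chars = len(line) + (1 if kept_lines else 0)
--         if kept_lines and total_chars + line_chars > max_chars:
--             break
--         if not kept_lines and len(line) > max_chars: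
--             return line[-max_chars:]
--
--         kept_lines.append(line)
--         total_chars += line_chars
--
--     if kept_lines:
--         return "\n".join(reversed(kept_lines))
--
--     return transcript_text[-max_chars:]
-- ===== SOURCE B (Python) =====
-- def _truncate_resume_transcript(transcript_text: str, max_chars: int) -> str:
--     """Keep the newest transcript lines without starting mid-line."""
--     if len(transcript_text) <= max_chars:
--         return transcript_text
--
--     lines = transcript_text.splitlines()
--     if not lines:
--         return transcript_text[-max_chars:]
--     if len(lines[-1]) > max_chars:
--         return lines[-1][-max_chars:]
--
--     # joined length of the full text, then drop oldest lines until it fits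
--     total = sum(len(line) for line in lines) + len(lines) - 1
--     i = 0
--     while total > max_chars:
--         total -= len(lines[i]) + 1
--         i += 1
--     return "\n".join(lines[i:])
-- ===== Notes on version B (the rewrite author's own statement) =====
-- stated objective: alternative
-- what changed: A accumulates kept lines newest-first in a reversed-iteration loop with a running total and a mid-loop early return; B hoists the empty/oversized-last-line guards out of the loop, precomputes the full joined length once, and walks forward from the oldest line subtracting line lengths until the suffix fits, then joins lines[i:].
import Mathlib
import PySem

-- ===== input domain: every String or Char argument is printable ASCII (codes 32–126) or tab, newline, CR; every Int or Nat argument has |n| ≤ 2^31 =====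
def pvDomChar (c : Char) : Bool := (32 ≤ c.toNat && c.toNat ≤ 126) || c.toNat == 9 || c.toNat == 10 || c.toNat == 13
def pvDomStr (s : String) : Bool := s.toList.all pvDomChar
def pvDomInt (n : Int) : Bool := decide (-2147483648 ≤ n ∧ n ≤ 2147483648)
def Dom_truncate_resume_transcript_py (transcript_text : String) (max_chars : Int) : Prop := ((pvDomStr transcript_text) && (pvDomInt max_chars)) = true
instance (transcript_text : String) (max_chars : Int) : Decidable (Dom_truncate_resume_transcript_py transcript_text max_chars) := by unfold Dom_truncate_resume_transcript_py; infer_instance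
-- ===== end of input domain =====

-- B keeps A's value everywhere but restructures: guards hoisted out of the loop, the joined
-- length precomputed once, and the kept suffix found by walking forward from the oldest line
-- (A walks backward from the newest accumulating kept lines).  Objective: alternative.

-- ===== PORT A =====
-- the 'for line in reversed(lines)' loop: state = (kept_lines, total_chars);
-- Sum.inl = the mid-loop 'return line[-max_chars:]', Sum.inr = normal exit with kept_lines
def pvALoop (m : Int) : List String → List String → Int → Sum String (List String)
  | [], kept, _ => Sum.inr kept
  | line :: rest, kept, total =>
    let line_chars : Int := PySem.Str.len line + (if kept ≠ [] then 1 else 0)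
    if kept ≠ [] ∧ total + line_chars > m then Sum.inr kept
    else if kept = [] ∧ PySem.Str.len line > m then
      Sum.inl (PySem.Str.slice line (some (-m)) none)
    else pvALoop m rest (kept ++ [line]) (total + line_chars)

def truncate_resume_transcript_py (transcript_text : String) (max_chars : Int) : String :=
  if PySem.Str.len transcript_text ≤ max_chars then transcript_text
  else
    let lines := PySem.Str.splitlines transcript_text
    match pvALoop max_chars lines.reverse [] 0 with
    | Sum.inl s => s
    | Sum.inr kept =>
      if kept ≠ [] then PySem.Str.join "\n" kept.reverse
      else PySem.Str.slice transcript_text (some (-max_chars)) none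

-- ===== PORT B =====
-- the 'while total > max_chars: total -= len(lines[i]) + 1; i += 1' loop;
-- advancing i is dropping the head of the remaining list
def pvBLoop (m : Int) : List String → Int → List String
  | [], _ => []
  | l :: rest, total =>
    if total > m then pvBLoop m rest (total - (PySem.Str.len l + 1))
    else l :: rest

def truncate_resume_transcript_py_alt (transcript_text : String) (max_chars : Int) : String :=
  if PySem.Str.len transcript_text ≤ max_chars then transcript_text
  else
    let lines := PySem.Str.splitlines transcript_text
    if lines = [] then PySem.Str.slice transcript_text (some (-max_chars)) none
    else if PySem.Str.len (PySem.List.pyGetD lines (-1) "") > max_chars then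
      PySem.Str.slice (PySem.List.pyGetD lines (-1) "") (some (-max_chars)) none
    else
      let total := (lines.foldl (fun acc l => acc + PySem.Str.len l) 0) + lines.length - 1
      PySem.Str.join "\n" (pvBLoop max_chars lines total)

-- ===== PRECONDITION & SPEC =====
def Spec_truncate_resume_transcript_py (transcript_text : String) (max_chars : Int) (out : String) : Prop := out = truncate_resume_transcript_py_alt transcript_text max_chars
instance (transcript_text : String) (max_chars : Int) (out : String) : Decidable (Spec_truncate_resume_transcript_py transcript_text max_chars out) := by unfold Spec_truncate_resume_transcript_py; infer_instance

-- ===== CLAIM (what is proved, stated in full; the proofs are below) =====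
def Claim_equal_truncate_resume_transcript_py : Prop := ∀ (transcript_text : String) (max_chars : Int), Dom_truncate_resume_transcript_py transcript_text max_chars → Spec_truncate_resume_transcript_py transcript_text max_chars (truncate_resume_transcript_py transcript_text max_chars)

-- ===== LEMMAS AND PROOFS =====

-- joined length of a line list: sum of line lengths plus (count - 1) separators
def pvJlen (ls : List String) : Int := (ls.map PySem.Str.len).sum + (ls.length : Int) - 1

theorem pvLen_nonneg (s : String) : 0 ≤ PySem.Str.len s := by
  rw [PySem.Str.len_eq]; exact_mod_cast Nat.zero_le _

theorem pvJlen_cons (a : String) (l : List String) :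
    pvJlen (a :: l) = PySem.Str.len a + 1 + pvJlen l := by
  simp [pvJlen, PySem.Str.len_eq]; ring

theorem pvJlen_singleton (a : String) : pvJlen [a] = PySem.Str.len a := by
  simp [pvJlen]

theorem pvJlen_le_append (pre S : List String) (hS : S ≠ []) :
    pvJlen S ≤ pvJlen (pre ++ S) := by
  induction pre with
  | nil => simp
  | cons p pre ih =>
    have hne : pre ++ S ≠ [] := by simp [hS]
    rw [List.cons_append, pvJlen_cons p (pre ++ S)]
    have := pvLen_nonneg p
    omega

theorem pvSumLen_foldl (ls : List String) (c : Int) :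
    ls.foldl (fun acc l => acc + PySem.Str.len l) c = c + (ls.map PySem.Str.len).sum := by
  induction ls generalizing c with
  | nil => simp
  | cons x xs ih =>
    rw [List.foldl_cons, ih]
    simp only [List.map_cons, List.sum_cons]
    ring

theorem pvBLoop_stop (m : Int) (S : List String) (hS : S ≠ []) (hle : pvJlen S ≤ m) :
    pvBLoop m S (pvJlen S) = S := by
  cases S with
  | nil => simp at hS
  | cons s rest => simp [pvBLoop, not_lt.mpr hle]

theorem pvBLoop_drop (m : Int) (pre : List String) (x : String) (S : List String)
    (hS : S ≠ []) (hle : pvJlen S ≤ m) (hgt : pvJlen (x :: S) > m) :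
    pvBLoop m (pre ++ x :: S) (pvJlen (pre ++ x :: S)) = S := by
  induction pre with
  | nil =>
    simp only [List.nil_append]
    rw [pvBLoop, if_pos hgt, pvJlen_cons x S]
    have : PySem.Str.len x + 1 + pvJlen S - (PySem.Str.len x + 1) = pvJlen S := by ring
    rw [this, pvBLoop_stop m S hS hle]
  | cons p pre ih =>
    have hxS : x :: S ≠ [] := by simp
    have hmono := pvJlen_le_append pre (x :: S) hxS
    have hp := pvLen_nonneg p
    rw [List.cons_append, pvBLoop, pvJlen_cons p (pre ++ x :: S),
        if_pos (by omega : PySem.Str.len p + 1 + pvJlen (pre ++ x :: S) > m)]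
    have : PySem.Str.len p + 1 + pvJlen (pre ++ x :: S) - (PySem.Str.len p + 1)
        = pvJlen (pre ++ x :: S) := by ring
    rw [this, ih]

theorem pvLoop_eq (m : Int) (rl : List String) : ∀ (S : List String), S ≠ [] → pvJlen S ≤ m →
    pvALoop m rl S.reverse (pvJlen S)
      = Sum.inr ((pvBLoop m (rl.reverse ++ S) (pvJlen (rl.reverse ++ S))).reverse)
    ∧ pvBLoop m (rl.reverse ++ S) (pvJlen (rl.reverse ++ S)) ≠ [] := by
  induction rl with
  | nil =>
    intro S hS hle
    simp only [List.reverse_nil, List.nil_append]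
    rw [pvBLoop_stop m S hS hle]
    exact ⟨by simp [pvALoop], hS⟩
  | cons x rl ih =>
    intro S hS hle
    have hkept : S.reverse ≠ [] := by simpa using hS
    have hrw : (x :: rl).reverse ++ S = rl.reverse ++ x :: S := by simp
    have hcons := pvJlen_cons x S
    rw [hrw, pvALoop]
    simp only [hkept, ne_eq, not_false_eq_true, if_true, true_and]
    by_cases hbr : pvJlen S + (PySem.Str.len x + 1) > m
    · rw [if_pos hbr, pvBLoop_drop m rl.reverse x S hS hle (by omega)]
      exact ⟨rfl, hS⟩
    · rw [if_neg hbr, if_neg (by rintro ⟨h, -⟩; exact h)]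
      have harg : S.reverse ++ [x] = (x :: S).reverse := by simp
      have htot : pvJlen S + (PySem.Str.len x + 1) = pvJlen (x :: S) := by omega
      rw [harg, htot]
      exact ih (x :: S) (by simp) (by omega)

theorem pvLast_get (rl : List String) (last : String) :
    PySem.List.pyGetD (rl.reverse ++ [last]) (-1) "" = last := by
  have hlen : 1 ≤ (rl.reverse ++ [last]).length := by simp
  rw [PySem.List.pyGetD_neg_ofNat (rl.reverse ++ [last]) 1 "" (by omega) hlen]
  simp

-- ===== VERDICT (by name: the statement is the Claim_ definition above) =====
theorem truncate_resume_transcript_py_spec : Claim_equal_truncate_resume_transcript_py := by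
  intro t m _
  show truncate_resume_transcript_py t m = truncate_resume_transcript_py_alt t m
  unfold truncate_resume_transcript_py truncate_resume_transcript_py_alt
  by_cases hlen : PySem.Str.len t ≤ m
  · rw [if_pos hlen, if_pos hlen]
  · rw [if_neg hlen, if_neg hlen]
    cases hrev : (PySem.Str.splitlines t).reverse with
    | nil =>
      have hnil : PySem.Str.splitlines t = [] := by
        have := congrArg List.reverse hrev; simpa using this
      simp [hnil, pvALoop]
    | cons last rl =>
      have hlines : PySem.Str.splitlines t = rl.reverse ++ [last] := by
        have := congrArg List.reverse hrev; simpa using this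
      simp only [hlines]
      have hAr : (rl.reverse ++ [last]).reverse = last :: rl := by simp
      rw [hAr, if_neg (by simp), pvLast_get, pvALoop,
          if_neg (by rintro ⟨h, -⟩; exact h rfl)]
      by_cases hbig : PySem.Str.len last > m
      · rw [if_pos ⟨rfl, hbig⟩, if_pos hbig]
      · rw [if_neg (by rintro ⟨-, h⟩; exact hbig h), if_neg hbig,
            show ([] : List String) ++ [last] = ([last] : List String).reverse from by simp,
            show (0:Int) + (PySem.Str.len last + if ([]:List String) ≠ [] then (1:Int) else 0)
              = pvJlen [last] from by simp [pvJlen_singleton]]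
        obtain ⟨heq, hne2⟩ := pvLoop_eq m rl [last] (by simp) (by rw [pvJlen_singleton]; omega)
        rw [heq]
        have htot : List.foldl (fun acc l => acc + PySem.Str.len l) 0 (rl.reverse ++ [last])
            + ((rl.reverse ++ [last]).length : Int) - 1 = pvJlen (rl.reverse ++ [last]) := by
          rw [pvSumLen_foldl]; simp [pvJlen]
        rw [htot]
        simp [hne2]
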